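-- pv_equiv track=rewrite | github.com/pce/sdlos | tooling/src/sdlos/features/tidy.py | _filter_compiler_flags
-- ===== SOURCE A (Python) =====
-- def _filter_compiler_flags(args: list[str]) -> list[str]:
--     """Extract only the flags relevant for libclang header resolution.
--
--     Keeps: ``-I``, ``-isystem``, ``-D``, ``-std``, ``-F``.
--     Drops: ``-o``, ``-c``, ``-MF``, ``-MT``, ``-MD``, source filenames,
--            response files, and all other driver flags.
--     """
--     result:   list[str] = []
--     skip_next: bool     = False
--
--     _KEEP_PREFIXES = ("-I", "-isystem", "-D", "-std=", "-F", "-include")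
--     _SKIP_FLAGS    = frozenset({"-o", "-c", "-MF", "-MT", "-MQ", "-arch"})
--     _SKIP_NEXT     = frozenset({"-o", "-MF", "-MT", "-MQ", "-arch", "-target"})
--
--     for arg in args:
--         if skip_next:
--             skip_next = False
--             continue
--
--         if arg in _SKIP_NEXT:
--             skip_next = True
--             continue
--
--         if arg in _SKIP_FLAGS:
--             continue
--
--         # Drop source / object file arguments.
--         if arg.endswith((".c", ".cpp", ".cxx", ".cc", ".o", ".obj")):
--             continue
--
--         # Keep known useful prefixes.
--         if any(arg.startswith(p) for p in _KEEP_PREFIXES):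
--             result.append(arg)
--             continue
--
--         # Some flags come as two tokens: "-I /path/to/include"
--         if arg in ("-I", "-isystem", "-include", "-D", "-F"):
--             result.append(arg)
--             # The next iteration will add the value.
--             continue
--
--     return result
-- ===== SOURCE B (Python) =====
-- def _filter_compiler_flags(args: list[str]) -> list[str]:
--     """Extract only the flags relevant for libclang header resolution.
--
--     Two staged passes: first strip each two-token flag together with its
--     value, then keep a token iff it carries a useful prefix and is not a
--     source/object file.  This is correct because no two-token flag and no
--     single-token skip flag ("-c") matches a keep prefix, so the whole
--     ordered branch chain of the one-pass version collapses into one pure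
--     predicate on the surviving tokens.
--     """
--     _SKIP_NEXT = frozenset({"-o", "-MF", "-MT", "-MQ", "-arch", "-target"})
--     _KEEP_PREFIXES = ("-I", "-isystem", "-D", "-std=", "-F", "-include")
--     _SRC_EXTS = (".c", ".cpp", ".cxx", ".cc", ".o", ".obj")
--
--     # pass 1: remove two-token flag/value pairs
--     survivors = []
--     it = iter(args)
--     for arg in it:
--         if arg in _SKIP_NEXT:
--             next(it, None)      # drop the value too
--         else:
--             survivors.append(arg)
--
--     # pass 2: pure per-token predicate
--     return [a for a in survivors
--             if a.startswith(_KEEP_PREFIXES) and not a.endswith(_SRC_EXTS)]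
-- ===== Notes on version B (the rewrite author's own statement) =====
-- stated objective: simpler
-- what changed: Replaced the single-pass skip_next state machine with five ordered branches by two staged passes: strip two-token flag/value pairs with an iterator, then filter with one pure predicate (keep-prefix and not source extension), after showing the skip-flag and two-token-append branches are redundant.
import Mathlib
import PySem

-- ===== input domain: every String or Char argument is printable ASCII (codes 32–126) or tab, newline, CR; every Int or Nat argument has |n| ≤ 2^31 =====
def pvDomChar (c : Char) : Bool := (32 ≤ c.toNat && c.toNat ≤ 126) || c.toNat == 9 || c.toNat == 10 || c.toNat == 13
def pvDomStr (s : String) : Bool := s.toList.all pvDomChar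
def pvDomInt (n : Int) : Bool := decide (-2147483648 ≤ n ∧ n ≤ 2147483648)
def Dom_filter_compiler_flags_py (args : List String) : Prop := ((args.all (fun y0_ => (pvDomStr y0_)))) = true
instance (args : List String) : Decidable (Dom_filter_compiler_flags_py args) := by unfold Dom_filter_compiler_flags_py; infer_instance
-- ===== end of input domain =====

-- B replaces A's one-pass skip_next state machine by two staged passes:
-- strip two-token flag/value pairs, then filter with one pure predicate.

-- ===== PORT A =====
def pvKeepPrefixes : List String := ["-I", "-isystem", "-D", "-std=", "-F", "-include"]
def pvSkipFlags : List String := ["-o", "-c", "-MF", "-MT", "-MQ", "-arch"]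
def pvSkipNext : List String := ["-o", "-MF", "-MT", "-MQ", "-arch", "-target"]
def pvSrcExts : List String := [".c", ".cpp", ".cxx", ".cc", ".o", ".obj"]
def pvTwoTok : List String := ["-I", "-isystem", "-include", "-D", "-F"]

-- one iteration of A's for-loop; state = (result, skip_next)
def pvStepA (st : List String × Bool) (arg : String) : List String × Bool :=
  if st.2 then (st.1, false)
  else if arg ∈ pvSkipNext then (st.1, true)
  else if arg ∈ pvSkipFlags then (st.1, false)
  else if pvSrcExts.any (fun e => PySem.Str.endswith arg e) then (st.1, false)
  else if pvKeepPrefixes.any (fun p => PySem.Str.startswith arg p) then (st.1 ++ [arg], false)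
  else if arg ∈ pvTwoTok then (st.1 ++ [arg], false)
  else (st.1, false)

def filter_compiler_flags_py (args : List String) : List String :=
  (args.foldl pvStepA ([], false)).1

-- ===== PORT B =====
-- pass 1: remove each two-token flag together with its value
def pvStripPairs : List String → List String
  | [] => []
  | arg :: rest =>
    if arg ∈ pvSkipNext then
      match rest with
      | [] => []
      | _ :: rest' => pvStripPairs rest'
    else arg :: pvStripPairs rest

-- pass 2 predicate: useful prefix and not a source/object file
def pvKeepTok (a : String) : Bool :=
  pvKeepPrefixes.any (fun p => PySem.Str.startswith a p) &&
    !(pvSrcExts.any (fun e => PySem.Str.endswith a e))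

def filter_compiler_flags_py_alt (args : List String) : List String :=
  (pvStripPairs args).filter pvKeepTok

-- ===== PRECONDITION & SPEC =====
def Spec_filter_compiler_flags_py (args : List String) (out : List String) : Prop := out = filter_compiler_flags_py_alt args
instance (args : List String) (out : List String) : Decidable (Spec_filter_compiler_flags_py args out) := by unfold Spec_filter_compiler_flags_py; infer_instance

-- ===== CLAIM (what is proved, stated in full; the proofs are below) =====
def Claim_equal_filter_compiler_flags_py : Prop := ∀ (args : List String), Dom_filter_compiler_flags_py args → Spec_filter_compiler_flags_py args (filter_compiler_flags_py args)

-- ===== LEMMAS AND PROOFS =====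
-- A's two-token branch is dead: every two-token flag already matches a keep prefix.
theorem pvTwoTok_keep (arg : String) (h : arg ∈ pvTwoTok) :
    ∃ p ∈ pvKeepPrefixes, PySem.Chars.startswith arg.toList p.toList = true := by
  fin_cases h <;> decide

-- Single-token skip flags never match a keep prefix, so pvKeepTok rejects them.
theorem pvSkipFlag_notKeep (arg : String) (h : arg ∈ pvSkipFlags) :
    pvKeepTok arg = false := by
  fin_cases h <;> decide

-- A's loop from skip_next = false computes B's staged result, prefixed by the accumulator.
theorem pvLoopA_eq : (args acc : List String) →
    (args.foldl pvStepA (acc, false)).1 = acc ++ (pvStripPairs args).filter pvKeepTok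
  | [], acc => by
    rw [show pvStripPairs [] = [] from by rw [pvStripPairs.eq_def]]
    simp [List.foldl, List.filter]
  | arg :: rest, acc => by
    by_cases hskip : arg ∈ pvSkipNext
    · cases rest with
      | nil =>
        rw [show pvStripPairs [arg] = [] from by rw [pvStripPairs.eq_def]; simp [hskip]]
        simp [List.foldl, pvStepA, hskip, List.filter]
      | cons y rest' =>
        rw [show pvStripPairs (arg :: y :: rest') = pvStripPairs rest' from by
          rw [pvStripPairs.eq_def]; simp [hskip]]
        simp [List.foldl, pvStepA, hskip, pvLoopA_eq rest' acc]
    · rw [show pvStripPairs (arg :: rest) = arg :: pvStripPairs rest from by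
        rw [pvStripPairs.eq_def]; simp [hskip]]
      by_cases hsf : arg ∈ pvSkipFlags
      · simp [List.foldl, pvStepA, hskip, hsf, List.filter,
          pvSkipFlag_notKeep arg hsf, pvLoopA_eq rest acc]
      · by_cases hext : ∃ e ∈ pvSrcExts, PySem.Chars.endswith arg.toList e.toList = true
        · have hb : pvSrcExts.any (fun e => PySem.Str.endswith arg e) = true := by
            simpa [List.any_eq_true, PySem.Str.endswith] using hext
          have hk : pvKeepTok arg = false := by unfold pvKeepTok; rw [hb]; simp
          simp [List.foldl, pvStepA, hskip, hsf, hext, List.filter, hk, pvLoopA_eq rest acc]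
        · have hext' : pvSrcExts.any (fun e => PySem.Str.endswith arg e) = false := by
            rw [← Bool.not_eq_true]
            simpa [List.any_eq_true, PySem.Str.endswith] using hext
          by_cases hkeep : ∃ p ∈ pvKeepPrefixes, PySem.Chars.startswith arg.toList p.toList = true
          · have hb : pvKeepPrefixes.any (fun p => PySem.Str.startswith arg p) = true := by
              simpa [List.any_eq_true, PySem.Str.startswith] using hkeep
            have hk : pvKeepTok arg = true := by unfold pvKeepTok; rw [hb, hext']; simp
            simp [List.foldl, pvStepA, hskip, hsf, hext, hkeep, List.filter, hk,
              pvLoopA_eq rest (acc ++ [arg])]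
          · have htt : arg ∉ pvTwoTok := fun h => hkeep (pvTwoTok_keep arg h)
            have hb : pvKeepPrefixes.any (fun p => PySem.Str.startswith arg p) = false := by
              rw [← Bool.not_eq_true]
              simpa [List.any_eq_true, PySem.Str.startswith] using hkeep
            have hk : pvKeepTok arg = false := by unfold pvKeepTok; rw [hb]; simp
            simp [List.foldl, pvStepA, hskip, hsf, hext, hkeep, htt, List.filter, hk,
              pvLoopA_eq rest acc]
termination_by args _ => args.length
decreasing_by all_goals simp

-- ===== VERDICT (by name: the statement is the Claim_ definition above) =====
theorem filter_compiler_flags_py_spec : Claim_equal_filter_compiler_flags_py := by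
  intro args _
  unfold Spec_filter_compiler_flags_py filter_compiler_flags_py filter_compiler_flags_py_alt
  simpa using pvLoopA_eq args []
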